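-- pv_equiv track=rewrite | github.com/AnastasiiaYelchaninova/Python-NA-mexmat | Newton interpolation_Yelchaninova_en.py | matrixA
-- ===== SOURCE A (Python) =====
-- def matrixA(x): # creates a matrix for solving the linear system
--     A = []
--     d = len(x)
--     for j in range(d):
--         s = []
--         for i in range(d-1):
--             s.append(0)
--         s.append(1)
--         A.append(s)
--     for j in range(d-1):
--         p = (x[j]-x[d-1])
--         for i in range(d-2, j-1, -1):
--             A[j][i] = p
--             p = p * (x[j]-x[i])
--     return A
-- ===== SOURCE B (Python) =====
-- def matrixA(x): # creates a matrix for solving the linear system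
--     d = len(x)
--
--     def entry(j, i):
--         if i == d - 1:
--             return 1
--         if i < j:
--             return 0
--         p = 1
--         for k in range(d - 1, i, -1):
--             p = p * (x[j] - x[k])
--         return p
--
--     return [[entry(j, i) for i in range(d)] for j in range(d)]
-- ===== Notes on version B (the rewrite author's own statement) =====
-- stated objective: simpler
-- what changed: B replaces A's build-zero-matrix-then-mutate scheme with its maintained running product p by a direct comprehension that recomputes each entry independently: 0 below the diagonal, 1 in the last column, otherwise an explicit descending product of (x[j]-x[k]).
import Mathlib
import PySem

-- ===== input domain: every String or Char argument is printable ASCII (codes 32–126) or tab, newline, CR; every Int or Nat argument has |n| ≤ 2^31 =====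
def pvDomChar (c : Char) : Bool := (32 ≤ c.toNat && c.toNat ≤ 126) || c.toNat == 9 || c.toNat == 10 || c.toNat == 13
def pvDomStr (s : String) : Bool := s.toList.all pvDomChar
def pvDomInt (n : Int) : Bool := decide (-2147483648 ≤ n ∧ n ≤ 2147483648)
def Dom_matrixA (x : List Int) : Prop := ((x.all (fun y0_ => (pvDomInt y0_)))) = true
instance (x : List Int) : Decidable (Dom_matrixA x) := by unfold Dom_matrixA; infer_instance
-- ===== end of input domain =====

-- B replaces A's build-zero-matrix-then-mutate scheme (with its running product p) by a direct
-- per-entry comprehension (0 below the diagonal, 1 in the last column, else a descending product):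
-- objective 'simpler' (B is not faster; it recomputes each product).

-- ===== PORT A =====
def matrixA (x : List Int) : List (List Int) :=
  let d : Int := (x.length : Int)
  let A : List (List Int) :=
    (PySem.List.pyRange 0 d 1).foldl
      (fun A _j =>
        A ++ [((PySem.List.pyRange 0 (d - 1) 1).foldl (fun s _i => s ++ [(0 : Int)]) []) ++ [(1 : Int)]])
      []
  (PySem.List.pyRange 0 (d - 1) 1).foldl
    (fun A j =>
      ((PySem.List.pyRange (d - 2) (j - 1) (-1)).foldl
          (fun (Ap : List (List Int) × Int) i =>
            (PySem.List.pySetD Ap.1 j (PySem.List.pySetD (PySem.List.pyGetD Ap.1 j []) i Ap.2),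
             Ap.2 * (PySem.List.pyGetD x j 0 - PySem.List.pyGetD x i 0)))
          (A, PySem.List.pyGetD x j 0 - PySem.List.pyGetD x (d - 1) 0)).1)
    A

-- ===== PORT B =====
def altEntry (x : List Int) (d : Int) (j i : Int) : Int :=
  if i = d - 1 then 1
  else if i < j then 0
  else
    (PySem.List.pyRange (d - 1) i (-1)).foldl
      (fun p k => p * (PySem.List.pyGetD x j 0 - PySem.List.pyGetD x k 0)) 1

def matrixA_alt (x : List Int) : List (List Int) :=
  let d : Int := (x.length : Int)
  (PySem.List.pyRange 0 d 1).map (fun j => (PySem.List.pyRange 0 d 1).map (fun i => altEntry x d j i))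

-- ===== PRECONDITION & SPEC =====
def Spec_matrixA (x : List Int) (out : List (List Int)) : Prop := out = matrixA_alt x
instance (x : List Int) (out : List (List Int)) : Decidable (Spec_matrixA x out) := by unfold Spec_matrixA; infer_instance

-- ===== CLAIM (what is proved, stated in full; the proofs are below) =====
def Claim_equal_matrixA : Prop := ∀ (x : List Int), Dom_matrixA x → Spec_matrixA x (matrixA x)

-- ===== LEMMAS AND PROOFS =====

-- proof-side names for the loop bodies of the two ports (definitionally equal to them)
def pvProd (x : List Int) (d j i : Int) : Int :=
  (PySem.List.pyRange (d - 1) i (-1)).foldl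
    (fun p k => p * (PySem.List.pyGetD x j 0 - PySem.List.pyGetD x k 0)) 1

def pvRowStep (x : List Int) (j : Int) (rp : List Int × Int) (i : Int) : List Int × Int :=
  (PySem.List.pySetD rp.1 i rp.2, rp.2 * (PySem.List.pyGetD x j 0 - PySem.List.pyGetD x i 0))

def pvMatStep (x : List Int) (j : Int) (Ap : List (List Int) × Int) (i : Int) : List (List Int) × Int :=
  (PySem.List.pySetD Ap.1 j (PySem.List.pySetD (PySem.List.pyGetD Ap.1 j []) i Ap.2),
   Ap.2 * (PySem.List.pyGetD x j 0 - PySem.List.pyGetD x i 0))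

def pvR0 (x : List Int) : List Int := List.replicate (x.length - 1) (0 : Int) ++ [1]

def pvBrow (x : List Int) (j : Int) : List Int :=
  (PySem.List.pyRange 0 (x.length : Int) 1).map (fun i => altEntry x (x.length : Int) j i)

lemma pv_matrixA_eq (x : List Int) :
    matrixA x
      = (PySem.List.pyRange 0 ((x.length : Int) - 1) 1).foldl
          (fun A j =>
            ((PySem.List.pyRange ((x.length : Int) - 2) (j - 1) (-1)).foldl (pvMatStep x j)
              (A, PySem.List.pyGetD x j 0 - PySem.List.pyGetD x ((x.length : Int) - 1) 0)).1)
          ((PySem.List.pyRange 0 (x.length : Int) 1).foldl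
            (fun A _j =>
              A ++ [((PySem.List.pyRange 0 ((x.length : Int) - 1) 1).foldl (fun s _i => s ++ [(0 : Int)]) []) ++ [(1 : Int)]])
            []) := rfl

lemma pv_matrixAalt_eq (x : List Int) :
    matrixA_alt x = (PySem.List.pyRange 0 (x.length : Int) 1).map (fun j => pvBrow x j) := rfl

lemma pv_altEntry_eq (x : List Int) (d j t : Int) :
    altEntry x d j t = if t = d - 1 then 1 else if t < j then 0 else pvProd x d j t := rfl

lemma pv_foldl_snoc {α β : Type} (r : α) (l : List β) :
    ∀ init : List α, l.foldl (fun s _ => s ++ [r]) init = init ++ List.replicate l.length r := by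
  induction l with
  | nil => intro init; simp
  | cons b l ih => intro init; simp [List.foldl_cons, ih, List.replicate_succ]

lemma pv_init (x : List Int) :
    (PySem.List.pyRange 0 (x.length : Int) 1).foldl
        (fun A _j =>
          A ++ [((PySem.List.pyRange 0 ((x.length : Int) - 1) 1).foldl (fun s _i => s ++ [(0 : Int)]) []) ++ [(1 : Int)]])
        []
      = List.replicate x.length (pvR0 x) := by
  have h1 : (PySem.List.pyRange 0 ((x.length : Int) - 1) 1).foldl (fun s _i => s ++ [(0 : Int)]) []
      = List.replicate (x.length - 1) (0 : Int) := by
    rw [pv_foldl_snoc]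
    simp only [List.nil_append, PySem.List.length_pyRange_one]
    congr 1
    omega
  rw [h1, pv_foldl_snoc]
  simp only [List.nil_append, PySem.List.length_pyRange_one, pvR0]
  congr 1

lemma pv_getD_set {α : Type} (l : List α) (i : Nat) (v d : α) (tn : Nat) (hi : i < l.length) :
    (l.set i v).getD tn d = if tn = i then v else l.getD tn d := by
  rw [List.getD_eq_getElem?_getD, List.getD_eq_getElem?_getD, List.getElem?_set]
  by_cases h : tn = i
  · rw [if_pos h.symm, if_pos h, if_pos hi]
    rfl
  · rw [if_neg (fun hh => h hh.symm), if_neg h]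

lemma pv_prod_step (x : List Int) (d j m : Int) (hm : m < d) :
    pvProd x d j (m - 1)
      = pvProd x d j m * (PySem.List.pyGetD x j 0 - PySem.List.pyGetD x m 0) := by
  have hsplit : PySem.List.pyRange (d - 1) (m - 1) (-1) = PySem.List.pyRange (d - 1) m (-1) ++ [m] := by
    rw [PySem.List.pyRange_neg_one_eq_reverse, PySem.List.pyRange_neg_one_eq_reverse]
    rw [show m - 1 + 1 = m from by ring, show d - 1 + 1 = d from by ring]
    rw [PySem.List.pyRange_one_cons hm]
    simp
  unfold pvProd
  rw [hsplit, List.foldl_append]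
  simp

lemma pv_prod_init (x : List Int) (d j : Int) :
    pvProd x d j (d - 2) = PySem.List.pyGetD x j 0 - PySem.List.pyGetD x (d - 1) 0 := by
  unfold pvProd
  rw [PySem.List.pyRange_neg_one_cons (show d - 2 < d - 1 by omega),
      PySem.List.pyRange_neg_one_eq_nil (show d - 1 - 1 ≤ d - 2 by omega)]
  simp

lemma pv_matStep_fold (x : List Int) (j : Int) (hj0 : 0 ≤ j) :
    ∀ (ks : List Int) (A : List (List Int)) (p : Int), j < (A.length : Int) →
      (ks.foldl (pvMatStep x j) (A, p)).1
        = PySem.List.pySetD A j ((ks.foldl (pvRowStep x j) (PySem.List.pyGetD A j [], p)).1) := by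
  intro ks
  induction ks with
  | nil =>
      intro A p hlt
      simp only [List.foldl_nil]
      rw [PySem.List.pySetD_of_nonneg _ _ hj0, PySem.List.pyGetD_eq_getElem A [] hj0 hlt,
          List.set_getElem_self]
  | cons i ks ih =>
      intro A p hlt
      simp only [List.foldl_cons]
      rw [show pvMatStep x j (A, p) i
            = (PySem.List.pySetD A j (PySem.List.pySetD (PySem.List.pyGetD A j []) i p),
               p * (PySem.List.pyGetD x j 0 - PySem.List.pyGetD x i 0)) from rfl]
      rw [ih _ _ (by rw [PySem.List.length_pySetD]; exact hlt)]
      have hget : PySem.List.pyGetD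
            (PySem.List.pySetD A j (PySem.List.pySetD (PySem.List.pyGetD A j []) i p)) j []
          = PySem.List.pySetD (PySem.List.pyGetD A j []) i p := by
        rw [PySem.List.pySetD_of_nonneg _ _ hj0,
            PySem.List.pyGetD_eq_getElem _ [] hj0 (by rw [List.length_set]; exact hlt)]
        exact List.getElem_set_self (by rw [List.length_set]; omega)
      rw [hget]
      rw [show pvRowStep x j (PySem.List.pyGetD A j [], p) i
            = (PySem.List.pySetD (PySem.List.pyGetD A j []) i p,
               p * (PySem.List.pyGetD x j 0 - PySem.List.pyGetD x i 0)) from rfl]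
      rw [PySem.List.pySetD_of_nonneg _ _ hj0, PySem.List.pySetD_of_nonneg _ _ hj0,
          PySem.List.pySetD_of_nonneg _ _ hj0, List.set_set]

lemma pv_rowLoop_char (x : List Int) (d j : Int) (hj0 : 0 ≤ j) :
    ∀ (n : Nat) (r : List Int), j - 1 + (n : Int) ≤ d - 2 → j - 1 + (n : Int) < (r.length : Int) →
      (((PySem.List.pyRange (j - 1 + (n : Int)) (j - 1) (-1)).foldl (pvRowStep x j)
          (r, pvProd x d j (j - 1 + (n : Int)))).1.length = r.length
       ∧ ∀ tn : Nat,
          (((PySem.List.pyRange (j - 1 + (n : Int)) (j - 1) (-1)).foldl (pvRowStep x j)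
              (r, pvProd x d j (j - 1 + (n : Int)))).1).getD tn 0
            = if j ≤ (tn : Int) ∧ (tn : Int) ≤ j - 1 + (n : Int) then pvProd x d j (tn : Int)
              else r.getD tn 0) := by
  intro n
  induction n with
  | zero =>
      intro r _ _
      rw [show ((0 : Nat) : Int) = 0 from rfl, add_zero,
          PySem.List.pyRange_neg_one_eq_nil (le_refl _)]
      refine ⟨rfl, fun tn => ?_⟩
      rw [if_neg (by omega)]
      rfl
  | succ n ih =>
      intro r hd hlen
      push_cast at hd hlen ⊢
      rw [show j - 1 + ((n : Int) + 1) = j + (n : Int) from by ring] at hd hlen ⊢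
      rw [PySem.List.pyRange_neg_one_cons (show j - 1 < j + (n : Int) by omega),
          show j + (n : Int) - 1 = j - 1 + (n : Int) from by ring]
      simp only [List.foldl_cons]
      rw [show pvRowStep x j (r, pvProd x d j (j + (n : Int))) (j + (n : Int))
            = (PySem.List.pySetD r (j + (n : Int)) (pvProd x d j (j + (n : Int))),
               pvProd x d j (j + (n : Int)) *
                 (PySem.List.pyGetD x j 0 - PySem.List.pyGetD x (j + (n : Int)) 0)) from rfl]
      have hps : pvProd x d j (j + (n : Int)) *
            (PySem.List.pyGetD x j 0 - PySem.List.pyGetD x (j + (n : Int)) 0)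
          = pvProd x d j (j - 1 + (n : Int)) := by
        have h := pv_prod_step x d j (j + (n : Int)) (by omega)
        rw [show j + (n : Int) - 1 = j - 1 + (n : Int) from by ring] at h
        exact h.symm
      rw [hps]
      obtain ⟨ihlen, ihent⟩ := ih (PySem.List.pySetD r (j + (n : Int)) (pvProd x d j (j + (n : Int))))
        (by omega) (by rw [PySem.List.length_pySetD]; omega)
      refine ⟨by rw [ihlen, PySem.List.length_pySetD], fun tn => ?_⟩
      rw [ihent tn]
      have hr' : (PySem.List.pySetD r (j + (n : Int)) (pvProd x d j (j + (n : Int)))).getD tn 0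
          = if (tn : Int) = j + (n : Int) then pvProd x d j (j + (n : Int)) else r.getD tn 0 := by
        rw [PySem.List.pySetD_of_nonneg _ _ (by omega),
            pv_getD_set _ _ _ _ _ (by omega)]
        by_cases h : (tn : Int) = j + (n : Int)
        · rw [if_pos (by omega), if_pos h]
        · rw [if_neg (by omega), if_neg h]
      by_cases h1 : j ≤ (tn : Int) ∧ (tn : Int) ≤ j - 1 + (n : Int)
      · rw [if_pos h1, if_pos (by omega)]
      · rw [if_neg h1, hr']
        by_cases h2 : (tn : Int) = j + (n : Int)
        · rw [if_pos h2, if_pos (by omega), h2]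
        · rw [if_neg h2, if_neg (by omega)]

lemma pv_rep_snoc_getD (m tn : Nat) :
    (List.replicate m (0 : Int) ++ [(1 : Int)]).getD tn 0 = if tn = m then 1 else 0 := by
  rw [List.getD_eq_getElem?_getD]
  rcases lt_trichotomy tn m with h | h | h
  · rw [List.getElem?_append_left (by simpa using h), List.getElem?_replicate,
        if_pos h, if_neg (by omega)]
    rfl
  · subst h
    rw [List.getElem?_append_right (by simp), if_pos rfl]
    simp
  · rw [List.getElem?_append_right (by simp; omega), if_neg (by omega)]
    have : tn - (List.replicate m (0 : Int)).length ≥ 1 := by simp; omega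
    rw [List.getElem?_eq_none (by simpa using this)]
    rfl

lemma pv_brow_getD (x : List Int) (j : Int) (tn : Nat) (h : tn < x.length) :
    (pvBrow x j).getD tn 0 = altEntry x (x.length : Int) j (tn : Int) := by
  unfold pvBrow
  have hl : tn < ((PySem.List.pyRange 0 (x.length : Int) 1).map
      (fun i => altEntry x (x.length : Int) j i)).length := by
    simp only [List.length_map, PySem.List.length_pyRange_one]
    omega
  rw [List.getD_eq_getElem _ _ hl, List.getElem_map, PySem.List.getElem_pyRange_one]
  rw [zero_add]

lemma pv_brow_length (x : List Int) (j : Int) : (pvBrow x j).length = x.length := by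
  simp only [pvBrow, List.length_map, PySem.List.length_pyRange_one]
  omega

lemma pv_r0_length (x : List Int) (h : 1 ≤ x.length) : (pvR0 x).length = x.length := by
  simp only [pvR0, List.length_append, List.length_replicate, List.length_cons, List.length_nil]
  omega

lemma pv_row_final (x : List Int) (j : Int) (hj0 : 0 ≤ j) (hjlt : j < (x.length : Int) - 1) :
    ((PySem.List.pyRange ((x.length : Int) - 2) (j - 1) (-1)).foldl (pvRowStep x j)
        (pvR0 x, PySem.List.pyGetD x j 0 - PySem.List.pyGetD x ((x.length : Int) - 1) 0)).1
      = pvBrow x j := by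
  obtain ⟨n, hn⟩ : ∃ n : Nat, (n : Int) = (x.length : Int) - 1 - j := ⟨((x.length : Int) - 1 - j).toNat, by omega⟩
  have e : (x.length : Int) - 2 = j - 1 + (n : Int) := by omega
  have hp : PySem.List.pyGetD x j 0 - PySem.List.pyGetD x ((x.length : Int) - 1) 0
      = pvProd x (x.length : Int) j (j - 1 + (n : Int)) := by
    rw [← e, pv_prod_init]
  rw [e, hp]
  obtain ⟨hlen, hent⟩ := pv_rowLoop_char x (x.length : Int) j hj0 n (pvR0 x)
    (by omega) (by rw [pv_r0_length x (by omega)]; omega)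
  apply List.ext_getElem
  · rw [hlen, pv_r0_length x (by omega), pv_brow_length]
  · intro tn h1 h2
    have htn : tn < x.length := by
      rw [hlen, pv_r0_length x (by omega)] at h1
      exact h1
    rw [← List.getD_eq_getElem _ (0 : Int) h1, ← List.getD_eq_getElem _ (0 : Int) h2,
        hent tn, pv_brow_getD x j tn htn, pv_altEntry_eq]
    rw [show pvR0 x = List.replicate (x.length - 1) (0 : Int) ++ [(1 : Int)] from rfl,
        pv_rep_snoc_getD]
    by_cases hc1 : (tn : Int) = (x.length : Int) - 1
    · rw [if_pos hc1, if_neg (by omega), if_pos (by omega)]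
    · rw [if_neg hc1]
      by_cases hc2 : (tn : Int) < j
      · rw [if_pos hc2, if_neg (by omega), if_neg (by omega)]
      · rw [if_neg hc2, if_pos (by omega)]

lemma pv_brow_last (x : List Int) (h : 1 ≤ x.length) :
    pvBrow x ((x.length : Int) - 1) = pvR0 x := by
  apply List.ext_getElem
  · rw [pv_brow_length, pv_r0_length x h]
  · intro tn h1 h2
    have htn : tn < x.length := by rw [pv_brow_length] at h1; exact h1
    rw [← List.getD_eq_getElem _ (0 : Int) h1, ← List.getD_eq_getElem _ (0 : Int) h2,
        pv_brow_getD x _ tn htn, pv_altEntry_eq,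
        show pvR0 x = List.replicate (x.length - 1) (0 : Int) ++ [(1 : Int)] from rfl,
        pv_rep_snoc_getD]
    by_cases hc1 : (tn : Int) = (x.length : Int) - 1
    · rw [if_pos hc1, if_pos (by omega)]
    · rw [if_neg hc1, if_pos (by omega), if_neg (by omega)]

lemma pv_outer (x : List Int) :
    ∀ (k : Nat) (a : Int) (A : List (List Int)), 0 ≤ a → a + (k : Int) = (x.length : Int) - 1 →
      A.length = x.length →
      (∀ tn : Nat, a ≤ (tn : Int) → tn < x.length → A.getD tn [] = pvR0 x) →
      (∀ tn : Nat, (tn : Int) < a → A.getD tn [] = pvBrow x (tn : Int)) →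
      (((PySem.List.pyRange a ((x.length : Int) - 1) 1).foldl
          (fun A j =>
            ((PySem.List.pyRange ((x.length : Int) - 2) (j - 1) (-1)).foldl (pvMatStep x j)
              (A, PySem.List.pyGetD x j 0 - PySem.List.pyGetD x ((x.length : Int) - 1) 0)).1) A).length
          = x.length
       ∧ ∀ tn : Nat, tn < x.length →
          ((PySem.List.pyRange a ((x.length : Int) - 1) 1).foldl
            (fun A j =>
              ((PySem.List.pyRange ((x.length : Int) - 2) (j - 1) (-1)).foldl (pvMatStep x j)
                (A, PySem.List.pyGetD x j 0 - PySem.List.pyGetD x ((x.length : Int) - 1) 0)).1) A).getD tn []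
            = if (tn : Int) < (x.length : Int) - 1 then pvBrow x (tn : Int) else pvR0 x) := by
  intro k
  induction k with
  | zero =>
      intro a A ha0 hak hA hR0 hBrow
      rw [PySem.List.pyRange_one_eq_nil (by omega)]
      simp only [List.foldl_nil]
      refine ⟨hA, fun tn htn => ?_⟩
      by_cases hc : (tn : Int) < (x.length : Int) - 1
      · rw [if_pos hc, hBrow tn (by omega)]
      · rw [if_neg hc, hR0 tn (by omega) htn]
  | succ k ih =>
      intro a A ha0 hak hA hR0 hBrow
      have halt : a < (x.length : Int) - 1 := by push_cast at hak; omega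
      rw [PySem.List.pyRange_one_cons halt]
      simp only [List.foldl_cons]
      rw [pv_matStep_fold x a ha0 _ A _ (by rw [hA]; omega)]
      have hgetA : PySem.List.pyGetD A a [] = pvR0 x := by
        rw [PySem.List.pyGetD_eq_getElem A [] ha0 (by rw [hA]; omega),
            ← List.getD_eq_getElem A ([] : List Int) (by rw [hA]; omega)]
        exact hR0 a.toNat (by omega) (by omega)
      rw [hgetA, pv_row_final x a ha0 halt]
      have hset : PySem.List.pySetD A a (pvBrow x a) = A.set a.toNat (pvBrow x a) :=
        PySem.List.pySetD_of_nonneg _ _ ha0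
      obtain ⟨ihlen, ihent⟩ := ih (a + 1) (A.set a.toNat (pvBrow x a)) (by omega)
        (by omega) (by rw [List.length_set]; exact hA)
        (fun tn h1 h2 => by
          rw [pv_getD_set _ _ _ _ _ (by rw [hA]; omega), if_neg (by omega)]
          exact hR0 tn (by omega) h2)
        (fun tn h1 => by
          rw [pv_getD_set _ _ _ _ _ (by rw [hA]; omega)]
          by_cases hc : (tn : Int) = a
          · rw [if_pos (by omega), hc]
          · rw [if_neg (by omega)]
            exact hBrow tn (by omega))
      rw [hset]
      exact ⟨ihlen, ihent⟩

-- ===== VERDICT (by name: the statement is the Claim_ definition above) =====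
theorem matrixA_spec : Claim_equal_matrixA := by
  unfold Claim_equal_matrixA
  intro x _
  unfold Spec_matrixA
  by_cases hx : x.length = 0
  · rw [List.eq_nil_of_length_eq_zero hx]
    rfl
  · rw [pv_matrixA_eq, pv_init, pv_matrixAalt_eq]
    obtain ⟨hlen, hent⟩ := pv_outer x (x.length - 1) 0 (List.replicate x.length (pvR0 x))
      (le_refl 0) (by omega) (by rw [List.length_replicate])
      (fun tn _ h2 => by
        rw [List.getD_eq_getElem?_getD, List.getElem?_replicate, if_pos h2]
        rfl)
      (fun tn h1 => by omega)
    apply List.ext_getElem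
    · rw [hlen, List.length_map, PySem.List.length_pyRange_one]
      omega
    · intro tn h1 h2
      have htn : tn < x.length := by rw [hlen] at h1; exact h1
      rw [← List.getD_eq_getElem _ ([] : List Int) h1, hent tn htn,
          List.getElem_map, PySem.List.getElem_pyRange_one, zero_add]
      by_cases hc : (tn : Int) < (x.length : Int) - 1
      · rw [if_pos hc]
      · rw [if_neg hc, show (tn : Int) = (x.length : Int) - 1 from by omega,
            pv_brow_last x (by omega)]
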